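-- pv_equiv track=rewrite | github.com/BurstBooksPublishing/Integrating-Data-Fusion-and-Cognitive-Architectures | source_code/Chapter - Chapter 30 Ethics, Safety, and Societal Implications/Section - Section 3 Transparency, Consent, and Oversight/Subsection - Item 1 Notice, opt-out paths, and data subject rights/optout.py | propagate_opt_out
-- ===== SOURCE A (Python) =====
-- from collections import deque
--
-- graph = {
--     "raw_1": ["track_42","agg_7"],
--     "track_42": ["scenario_3"],
--     "agg_7": [],
--     "scenario_3": []
-- }
--
-- def propagate_opt_out(seeds):
--     # BFS to compute closure; returns list of affected artifacts
--     q = deque(seeds)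
--     affected = set(seeds)
--     while q:
--         a = q.popleft()
--         for b in graph.get(a, []):
--             if b not in affected:
--                 affected.add(b); q.append(b)
--     return list(affected)
-- ===== SOURCE B (Python) =====
-- graph = {
--     "raw_1": ["track_42","agg_7"],
--     "track_42": ["scenario_3"],
--     "agg_7": [],
--     "scenario_3": []
-- }
--
-- def propagate_opt_out(seeds):
--     # level-synchronous closure: expand whole generations, no queue
--     affected = set(seeds)
--     frontier = list(seeds)
--     while frontier:
--         nxt = []
--         for a in frontier:
--             for b in graph.get(a, []):
--                 if b not in affected:
--                     affected.add(b)
--                     nxt.append(b)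
--         frontier = nxt
--     return list(affected)
-- ===== Notes on version B (the rewrite author's own statement) =====
-- stated objective: alternative
-- what changed: Replaces the deque-based worklist BFS by a level-synchronous closure: each pass expands the whole current generation into a fresh frontier list, so no queue (and no collections import) is maintained.
import Mathlib
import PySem

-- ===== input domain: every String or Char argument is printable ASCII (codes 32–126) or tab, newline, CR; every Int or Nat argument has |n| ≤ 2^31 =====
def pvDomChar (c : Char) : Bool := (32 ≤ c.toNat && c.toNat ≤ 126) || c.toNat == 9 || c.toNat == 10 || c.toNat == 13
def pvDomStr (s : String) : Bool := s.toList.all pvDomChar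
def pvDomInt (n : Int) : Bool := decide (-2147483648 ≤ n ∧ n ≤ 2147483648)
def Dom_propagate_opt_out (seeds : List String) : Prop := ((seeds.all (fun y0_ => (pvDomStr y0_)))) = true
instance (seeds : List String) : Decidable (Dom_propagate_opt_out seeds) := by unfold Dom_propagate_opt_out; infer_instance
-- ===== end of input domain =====

-- B replaces A's deque-based worklist BFS by a level-synchronous closure that expands whole
-- generations into a fresh frontier list (objective: alternative; same cost). Python A returns
-- list(set), whose iteration order is unspecified; both ports return the set in first-insertion
-- order, the PySem.Set convention (outputs are compared as sets).

-- ===== PORT A =====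
-- module constant 'graph'
def pvGraph : PySem.Dict String (List String) :=
  PySem.Dict.ofList
    [("raw_1", ["track_42", "agg_7"]), ("track_42", ["scenario_3"]),
     ("agg_7", []), ("scenario_3", [])]

-- 'for b in graph.get(a, []): if b not in affected: affected.add(b); q.append(b)'
def pvBfsInner : List String → PySem.Set String → List String → PySem.Set String × List String
  | [], aff, q => (aff, q)
  | b :: bs, aff, q =>
      if PySem.Set.contains aff b then pvBfsInner bs aff q
      else pvBfsInner bs (PySem.Set.add aff b) (q ++ [b])

-- 'while q: a = q.popleft(); …' — the fuel only makes the recursion total: the loop pops once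
-- per iteration and at most 3 nodes (the graph's values) can ever be appended, so it runs at
-- most seeds.length + 3 iterations and the generous bound below is never reached.
def pvBfsLoop : Nat → List String → PySem.Set String → PySem.Set String
  | 0, _, aff => aff
  | _ + 1, [], aff => aff
  | fuel + 1, a :: q, aff =>
      let st := pvBfsInner (PySem.Dict.getD pvGraph a []) aff q
      pvBfsLoop fuel st.2 st.1

def propagate_opt_out (seeds : List String) : List String :=
  pvBfsLoop (seeds.length + 8) seeds (PySem.Set.ofList seeds)

-- ===== PORT B =====
-- 'for b in graph.get(a, []): if b not in affected: affected.add(b); nxt.append(b)'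
def pvExpandNode (st : PySem.Set String × List String) (a : String) :
    PySem.Set String × List String :=
  (PySem.Dict.getD pvGraph a []).foldl
    (fun st b =>
      if PySem.Set.contains st.1 b then st else (PySem.Set.add st.1 b, st.2 ++ [b])) st

-- 'while frontier: …; frontier = nxt' — fuel only for totality: the graph's depth is ≤ 3, so at
-- most 4 rounds ever run.
def pvRounds : Nat → List String → PySem.Set String → PySem.Set String
  | 0, _, aff => aff
  | _ + 1, [], aff => aff
  | fuel + 1, frontier, aff =>
      let st := frontier.foldl pvExpandNode (aff, [])
      pvRounds fuel st.2 st.1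

def propagate_opt_out_alt (seeds : List String) : List String :=
  pvRounds 5 seeds (PySem.Set.ofList seeds)

-- ===== PRECONDITION & SPEC =====
def Spec_propagate_opt_out (seeds : List String) (out : List String) : Prop := out = propagate_opt_out_alt seeds
instance (seeds : List String) (out : List String) : Decidable (Spec_propagate_opt_out seeds out) := by unfold Spec_propagate_opt_out; infer_instance

-- ===== CLAIM (what is proved, stated in full; the proofs are below) =====
def Claim_equal_propagate_opt_out : Prop := ∀ (seeds : List String), Dom_propagate_opt_out seeds → Spec_propagate_opt_out seeds (propagate_opt_out seeds)

-- ===== LEMMAS AND PROOFS =====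

-- the one-element step both inner loops perform
def pvE (st : PySem.Set String × List String) (b : String) : PySem.Set String × List String :=
  if PySem.Set.contains st.1 b then st else (PySem.Set.add st.1 b, st.2 ++ [b])

def pvNbrs (a : String) : List String := PySem.Dict.getD pvGraph a []

def pvAffOf (bs : List String) (aff : PySem.Set String) : PySem.Set String :=
  (bs.foldl pvE (aff, [])).1
def pvNewOf (bs : List String) (aff : PySem.Set String) : List String :=
  (bs.foldl pvE (aff, [])).2

-- expansion of a whole frontier, node by node
def pvXAff : List String → PySem.Set String → PySem.Set String
  | [], aff => aff
  | x :: f, aff => pvXAff f (pvAffOf (pvNbrs x) aff)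
def pvXNew : List String → PySem.Set String → List String
  | [], _ => []
  | x :: f, aff => pvNewOf (pvNbrs x) aff ++ pvXNew f (pvAffOf (pvNbrs x) aff)

-- the three nodes that can ever be discovered (the graph's values)
def pvTas : List String := ["track_42", "agg_7", "scenario_3"]

-- closed form of processing a queue that holds only discoverable nodes
def pvClose (q : List String) (aff : PySem.Set String) : PySem.Set String :=
  if "track_42" ∈ q ∧ "scenario_3" ∉ aff then PySem.Set.add aff "scenario_3" else aff

def pvFresh3 (aff : PySem.Set String) : Nat :=
  (if "track_42" ∈ aff then 0 else 1) + (if "agg_7" ∈ aff then 0 else 1) +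
    (if "scenario_3" ∈ aff then 0 else 1)

theorem pvNbrs_cases (x : String) :
    pvNbrs x = if x = "raw_1" then ["track_42", "agg_7"]
      else if x = "track_42" then ["scenario_3"] else [] := by
  have hi : pvGraph.items = [("raw_1", ["track_42", "agg_7"]), ("track_42", ["scenario_3"]),
     ("agg_7", []), ("scenario_3", [])] := by decide
  by_cases h1 : x = "raw_1"
  · subst h1; decide
  · by_cases h2 : x = "track_42"
    · subst h2; decide
    · by_cases h3 : x = "agg_7"
      · subst h3; simp [h1, h2]; decide
      · by_cases h4 : x = "scenario_3"
        · subst h4; simp [h1, h2]; decide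
        · have b1 : ("raw_1" == x) = false := beq_eq_false_iff_ne.mpr (Ne.symm h1)
          have b2 : ("track_42" == x) = false := beq_eq_false_iff_ne.mpr (Ne.symm h2)
          have b3 : ("agg_7" == x) = false := beq_eq_false_iff_ne.mpr (Ne.symm h3)
          have b4 : ("scenario_3" == x) = false := beq_eq_false_iff_ne.mpr (Ne.symm h4)
          simp [pvNbrs, PySem.Dict.getD, PySem.Dict.get?, hi, List.find?, b1, b2, b3, b4, h1, h2]

theorem pvNbrs_sub (x : String) : ∀ y ∈ pvNbrs x, y ∈ pvTas := by
  rw [pvNbrs_cases]; split_ifs <;> intro y hy <;> simp_all [pvTas]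
  all_goals tauto

theorem pvE_of_mem {aff : PySem.Set String} {b : String} (h : b ∈ aff) (q : List String) :
    pvE (aff, q) b = (aff, q) := by simp [pvE, h]

theorem pvE_of_not_mem {aff : PySem.Set String} {b : String} (h : b ∉ aff) (q : List String) :
    pvE (aff, q) b = (PySem.Set.add aff b, q ++ [b]) := by simp [pvE, h]

theorem foldl_pvE_eq (bs : List String) : ∀ (aff : PySem.Set String) (q : List String),
    bs.foldl pvE (aff, q) = (pvAffOf bs aff, q ++ pvNewOf bs aff) := by
  induction bs with
  | nil => intro aff q; simp [pvAffOf, pvNewOf]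
  | cons b bs ih =>
    intro aff q
    by_cases h : b ∈ aff
    · have ha : pvAffOf (b :: bs) aff = pvAffOf bs aff := by
        simp only [pvAffOf, List.foldl_cons, pvE_of_mem h]
      have hn : pvNewOf (b :: bs) aff = pvNewOf bs aff := by
        simp only [pvNewOf, List.foldl_cons, pvE_of_mem h]
      rw [List.foldl_cons, pvE_of_mem h, ih, ha, hn]
    · have ha : pvAffOf (b :: bs) aff = pvAffOf bs (PySem.Set.add aff b) := by
        simp only [pvAffOf, List.foldl_cons, pvE_of_not_mem h]
        rw [ih, ih]
      have hn : pvNewOf (b :: bs) aff = [b] ++ pvNewOf bs (PySem.Set.add aff b) := by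
        simp only [pvNewOf, List.foldl_cons, pvE_of_not_mem h]
        rw [ih, ih]; simp
      rw [List.foldl_cons, pvE_of_not_mem h, ih, ha, hn]
      simp

theorem pvAffOf_nil (aff : PySem.Set String) : pvAffOf [] aff = aff := rfl
theorem pvNewOf_nil (aff : PySem.Set String) : pvNewOf [] aff = [] := rfl

theorem pvAffOf_cons (b : String) (bs : List String) (aff : PySem.Set String) :
    pvAffOf (b :: bs) aff = pvAffOf bs (PySem.Set.add aff b) := by
  by_cases h : b ∈ aff
  · simp only [pvAffOf, List.foldl_cons, pvE_of_mem h, PySem.Set.add_of_mem h]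
  · simp only [pvAffOf, List.foldl_cons, pvE_of_not_mem h]
    rw [foldl_pvE_eq, foldl_pvE_eq]

theorem pvNewOf_cons (b : String) (bs : List String) (aff : PySem.Set String) :
    pvNewOf (b :: bs) aff = (if b ∈ aff then [] else [b]) ++ pvNewOf bs (PySem.Set.add aff b) := by
  by_cases h : b ∈ aff
  · simp only [pvNewOf, List.foldl_cons, pvE_of_mem h, PySem.Set.add_of_mem h, if_pos h,
      List.nil_append]
  · simp only [pvNewOf, List.foldl_cons, pvE_of_not_mem h, if_neg h]
    rw [foldl_pvE_eq, foldl_pvE_eq]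
    simp

theorem pvAffOf_single (b : String) (aff : PySem.Set String) :
    pvAffOf [b] aff = PySem.Set.add aff b := by
  rw [pvAffOf_cons]; rfl

theorem pvNewOf_single (b : String) (aff : PySem.Set String) :
    pvNewOf [b] aff = if b ∈ aff then [] else [b] := by
  rw [pvNewOf_cons, pvNewOf_nil, List.append_nil]

theorem pvNewOf_subset (bs : List String) : ∀ (aff : PySem.Set String), ∀ y ∈ pvNewOf bs aff, y ∈ bs := by
  induction bs with
  | nil => intro aff y hy; simp [pvNewOf] at hy
  | cons b bs ih =>
    intro aff y hy
    rw [pvNewOf_cons] at hy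
    rcases List.mem_append.mp hy with hy | hy
    · split at hy <;> simp_all
    · exact List.mem_cons_of_mem _ (ih _ y hy)

theorem pvBfsInner_eq_foldl (bs : List String) : ∀ (aff : PySem.Set String) (q : List String),
    pvBfsInner bs aff q = bs.foldl pvE (aff, q) := by
  induction bs with
  | nil => intro aff q; rfl
  | cons b bs ih =>
    intro aff q
    by_cases h : b ∈ aff
    · rw [List.foldl_cons, pvE_of_mem h]
      simp only [pvBfsInner, PySem.Set.contains_eq_listContains]
      simp [h, ih]
    · rw [List.foldl_cons, pvE_of_not_mem h]
      simp only [pvBfsInner, PySem.Set.contains_eq_listContains]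
      simp [h, ih]

theorem pvBfsInner_eq (bs : List String) (aff : PySem.Set String) (q : List String) :
    pvBfsInner bs aff q = (pvAffOf bs aff, q ++ pvNewOf bs aff) := by
  rw [pvBfsInner_eq_foldl, foldl_pvE_eq]

theorem pvExpandNode_eq (st : PySem.Set String × List String) (a : String) :
    pvExpandNode st a = (pvNbrs a).foldl pvE st := rfl

theorem foldl_pvExpandNode_eq (f : List String) : ∀ (aff : PySem.Set String) (acc : List String),
    f.foldl pvExpandNode (aff, acc) = (pvXAff f aff, acc ++ pvXNew f aff) := by
  induction f with
  | nil => intro aff acc; simp [pvXAff, pvXNew]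
  | cons x f ih =>
    intro aff acc
    rw [List.foldl_cons, pvExpandNode_eq, foldl_pvE_eq, ih]
    simp [pvXAff, pvXNew]

theorem pvXNew_sub (f : List String) : ∀ (aff : PySem.Set String), ∀ y ∈ pvXNew f aff, y ∈ pvTas := by
  induction f with
  | nil => intro aff y hy; simp [pvXNew] at hy
  | cons x f ih =>
    intro aff y hy
    rw [pvXNew] at hy
    rcases List.mem_append.mp hy with hy | hy
    · exact pvNbrs_sub x y (pvNewOf_subset _ _ y hy)
    · exact ih _ y hy

theorem pvFresh3_le (aff : PySem.Set String) : pvFresh3 aff ≤ 3 := by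
  unfold pvFresh3; split_ifs <;> omega

theorem pvBudget (x : String) (aff : PySem.Set String) :
    (pvNewOf (pvNbrs x) aff).length + pvFresh3 (pvAffOf (pvNbrs x) aff) ≤ pvFresh3 aff := by
  rw [pvNbrs_cases]
  split_ifs with h1 h2
  · by_cases c1 : "track_42" ∈ aff <;> by_cases c2 : "agg_7" ∈ aff <;>
      by_cases c3 : "scenario_3" ∈ aff <;>
      simp [pvNewOf_cons, pvNewOf_nil, pvAffOf_cons, pvAffOf_nil, pvFresh3,
        List.mem_append, c1, c2, c3]
  · by_cases c1 : "track_42" ∈ aff <;> by_cases c2 : "agg_7" ∈ aff <;>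
      by_cases c3 : "scenario_3" ∈ aff <;>
      simp [pvNewOf_cons, pvNewOf_nil, pvAffOf_cons, pvAffOf_nil, pvFresh3,
        List.mem_append, c1, c2, c3]
  · simp [pvNewOf_nil, pvAffOf_nil]

-- a queue holding only {track_42, agg_7, scenario_3}: the loop closes with at most one new node
theorem pvBfsLoop_tail (fuel : Nat) :
    ∀ q aff, (∀ x ∈ q, x ∈ pvTas) →
      q.length + (if "scenario_3" ∈ aff then 1 else 2) ≤ fuel →
      pvBfsLoop fuel q aff = pvClose q aff := by
  induction fuel with
  | zero =>
    intro q aff _ hlen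
    exfalso; revert hlen; split <;> omega
  | succ fuel ih =>
    intro q aff hsub hlen
    cases q with
    | nil => simp [pvBfsLoop, pvClose]
    | cons x q' =>
      have hx : x = "track_42" ∨ x = "agg_7" ∨ x = "scenario_3" := by
        have := hsub x (List.mem_cons_self)
        simpa [pvTas] using this
      have hsub' : ∀ y ∈ q', y ∈ pvTas := fun y hy => hsub y (List.mem_cons_of_mem _ hy)
      simp only [pvBfsLoop]
      have hg : PySem.Dict.getD pvGraph x [] = pvNbrs x := rfl
      rw [hg, pvBfsInner_eq]
      rcases hx with hx | hx | hx
      · subst hx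
        rw [pvNbrs_cases]
        simp only [reduceIte, String.reduceEq]
        by_cases hs : "scenario_3" ∈ aff
        · rw [pvNewOf_single, pvAffOf_single, if_pos hs, PySem.Set.add_of_mem hs,
            List.append_nil]
          rw [ih q' aff hsub'
            (by rw [if_pos hs] at hlen ⊢
                simp only [List.length_cons] at hlen; omega)]
          simp [pvClose, hs]
        · rw [pvNewOf_single, pvAffOf_single, if_neg hs]
          have hs' : "scenario_3" ∈ PySem.Set.add aff "scenario_3" := by
            simp [PySem.Set.mem_add]
          rw [ih (q' ++ ["scenario_3"]) (PySem.Set.add aff "scenario_3")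
            (by intro y hy
                rcases List.mem_append.mp hy with hy | hy
                · exact hsub' y hy
                · simp_all [pvTas])
            (by rw [if_pos hs']
                rw [if_neg hs] at hlen
                simp only [List.length_append, List.length_cons, List.length_nil] at hlen ⊢
                omega)]
          simp [pvClose, hs]
      · subst hx
        rw [pvNbrs_cases]
        simp only [reduceIte, String.reduceEq]
        rw [pvNewOf_nil, pvAffOf_nil]
        simp only [List.append_nil]
        rw [ih q' aff hsub'
          (by revert hlen; simp only [List.length_cons]; split <;> omega)]
        simp [pvClose]
      · subst hx
        rw [pvNbrs_cases]
        simp only [reduceIte, String.reduceEq]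
        rw [pvNewOf_nil, pvAffOf_nil]
        simp only [List.append_nil]
        rw [ih q' aff hsub'
          (by revert hlen; simp only [List.length_cons]; split <;> omega)]
        simp [pvClose]

-- the seed phase: processing 'f ++ pend' = expand f node by node, then close
theorem pvBfsLoop_main (f : List String) :
    ∀ pend aff fuel, (∀ x ∈ pend, x ∈ pvTas) →
      f.length + pend.length + pvFresh3 aff + 2 ≤ fuel →
      pvBfsLoop fuel (f ++ pend) aff = pvClose (pend ++ pvXNew f aff) (pvXAff f aff) := by
  induction f with
  | nil =>
    intro pend aff fuel hsub hlen
    simp only [List.nil_append, pvXAff, pvXNew, List.append_nil]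
    exact pvBfsLoop_tail fuel pend aff hsub (by revert hlen; split <;> omega)
  | cons x f ih =>
    intro pend aff fuel hsub hlen
    cases fuel with
    | zero => omega
    | succ fuel =>
      simp only [List.cons_append, pvBfsLoop]
      have hg : PySem.Dict.getD pvGraph x [] = pvNbrs x := rfl
      rw [hg, pvBfsInner_eq, List.append_assoc]
      rw [ih (pend ++ pvNewOf (pvNbrs x) aff) (pvAffOf (pvNbrs x) aff) fuel
        (by intro y hy
            rcases List.mem_append.mp hy with hy | hy
            · exact hsub y hy
            · exact pvNbrs_sub x y (pvNewOf_subset _ _ y hy))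
        (by have hb := pvBudget x aff
            simp only [List.length_cons, List.length_append] at hlen ⊢
            omega)]
      simp [pvXAff, pvXNew, List.append_assoc]

-- one level-synchronous expansion of a {track_42, agg_7, scenario_3}-frontier
theorem pvX_tas (q : List String) :
    ∀ aff, (∀ x ∈ q, x ∈ pvTas) →
      pvXAff q aff = pvClose q aff ∧
        pvXNew q aff = (if "track_42" ∈ q ∧ "scenario_3" ∉ aff then ["scenario_3"] else []) := by
  induction q with
  | nil => intro aff _; simp [pvXAff, pvXNew, pvClose]
  | cons x q' ih =>
    intro aff hsub
    have hx : x = "track_42" ∨ x = "agg_7" ∨ x = "scenario_3" := by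
      have := hsub x (List.mem_cons_self)
      simpa [pvTas] using this
    have hsub' : ∀ y ∈ q', y ∈ pvTas := fun y hy => hsub y (List.mem_cons_of_mem _ hy)
    rcases hx with hx | hx | hx
    · subst hx
      have hn : pvNbrs "track_42" = ["scenario_3"] := by rw [pvNbrs_cases]; simp
      have hs' : "scenario_3" ∈ PySem.Set.add aff "scenario_3" := by simp [PySem.Set.mem_add]
      obtain ⟨iha, ihn⟩ := ih (PySem.Set.add aff "scenario_3") hsub'
      constructor
      · rw [pvXAff, hn, pvAffOf_single, iha]
        by_cases hs : "scenario_3" ∈ aff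
        · simp [pvClose, hs]
        · simp [pvClose, hs]
      · rw [pvXNew, hn, pvNewOf_single, pvAffOf_single, ihn]
        by_cases hs : "scenario_3" ∈ aff
        · simp [hs]
        · simp [hs]
    · subst hx
      have hn : pvNbrs "agg_7" = [] := by rw [pvNbrs_cases]; simp
      obtain ⟨iha, ihn⟩ := ih aff hsub'
      constructor
      · rw [pvXAff, hn, pvAffOf_nil, iha]
        simp [pvClose]
      · rw [pvXNew, hn, pvNewOf_nil, pvAffOf_nil, ihn]
        simp
    · subst hx
      have hn : pvNbrs "scenario_3" = [] := by rw [pvNbrs_cases]; simp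
      obtain ⟨iha, ihn⟩ := ih aff hsub'
      constructor
      · rw [pvXAff, hn, pvAffOf_nil, iha]
        simp [pvClose]
      · rw [pvXNew, hn, pvNewOf_nil, pvAffOf_nil, ihn]
        simp

-- the remaining rounds of B on a {track_42, agg_7, scenario_3}-frontier
theorem pvRounds_tail (q : List String) (aff : PySem.Set String)
    (hsub : ∀ x ∈ q, x ∈ pvTas) : pvRounds 4 q aff = pvClose q aff := by
  cases q with
  | nil => simp [pvRounds, pvClose]
  | cons x q' =>
    simp only [pvRounds]
    rw [foldl_pvExpandNode_eq]
    obtain ⟨ha, hn⟩ := pvX_tas (x :: q') aff hsub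
    rw [ha, hn]
    by_cases hc : "track_42" ∈ x :: q' ∧ "scenario_3" ∉ aff
    · rw [if_pos hc]
      simp only [List.nil_append, pvRounds]
      rw [foldl_pvExpandNode_eq]
      obtain ⟨ha2, hn2⟩ := pvX_tas ["scenario_3"] (pvClose (x :: q') aff) (by simp [pvTas])
      rw [ha2, hn2]
      simp [pvClose, pvRounds]
    · rw [if_neg hc]
      simp [pvRounds]

-- ===== VERDICT (by name: the statement is the Claim_ definition above) =====
theorem propagate_opt_out_spec : Claim_equal_propagate_opt_out := by
  intro seeds _
  unfold Spec_propagate_opt_out propagate_opt_out propagate_opt_out_alt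
  have hA : pvBfsLoop (seeds.length + 8) seeds (PySem.Set.ofList seeds)
      = pvClose (pvXNew seeds (PySem.Set.ofList seeds)) (pvXAff seeds (PySem.Set.ofList seeds)) := by
    have := pvBfsLoop_main seeds [] (PySem.Set.ofList seeds) (seeds.length + 8)
      (by intro y hy; simp at hy)
      (by have := pvFresh3_le (PySem.Set.ofList seeds)
          simp only [List.length_nil]; omega)
    simpa using this
  rw [hA]
  cases seeds with
  | nil => simp [pvRounds, pvXNew, pvXAff, pvClose]
  | cons x rest =>
    simp only [pvRounds]
    rw [foldl_pvExpandNode_eq]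
    simp only [List.nil_append]
    rw [pvRounds_tail _ _ (pvXNew_sub (x :: rest) _)]
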